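-- pv_equiv track=rewrite | github.com/ZhaoXiaopeng1979/CourseGoodPractice | DL101-001/wuyangping /ch9/project/web_robot/chat_model.py | index_to_words
-- ===== SOURCE A (Python) =====
-- def index_to_words(data, dictionary, PAD_ID, END_ID):
--     text = ''
--     for w in data:
--         if (w==END_ID):
--             break
--         if (w!=PAD_ID):
--             text += dictionary[w]
--     return text
-- ===== SOURCE B (Python) =====
-- def index_to_words(data, dictionary, PAD_ID, END_ID):
--     # Truncation point: first END_ID (or the whole list), then assemble the
--     # result by balanced divide-and-conquer concatenation over index ranges.
--     data = list(data)
--     n = data.index(END_ID) if END_ID in data else len(data)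
--
--     def merge(lo, hi):
--         if hi <= lo:
--             return ''
--         if hi - lo == 1:
--             w = data[lo]
--             return '' if w == PAD_ID else dictionary[w]
--         mid = (lo + hi) // 2
--         return merge(lo, mid) + merge(mid, hi)
--
--     return merge(0, n)
-- ===== Notes on version B (the rewrite author's own statement) =====
-- stated objective: alternative
-- what changed: Replaced A's single break-and-accumulate loop (repeated string +=) with a truncate-at-first-END step followed by balanced divide-and-conquer concatenation over index ranges (a recursion tree of depth O(log n) instead of a linear accumulator).
import Mathlib
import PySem

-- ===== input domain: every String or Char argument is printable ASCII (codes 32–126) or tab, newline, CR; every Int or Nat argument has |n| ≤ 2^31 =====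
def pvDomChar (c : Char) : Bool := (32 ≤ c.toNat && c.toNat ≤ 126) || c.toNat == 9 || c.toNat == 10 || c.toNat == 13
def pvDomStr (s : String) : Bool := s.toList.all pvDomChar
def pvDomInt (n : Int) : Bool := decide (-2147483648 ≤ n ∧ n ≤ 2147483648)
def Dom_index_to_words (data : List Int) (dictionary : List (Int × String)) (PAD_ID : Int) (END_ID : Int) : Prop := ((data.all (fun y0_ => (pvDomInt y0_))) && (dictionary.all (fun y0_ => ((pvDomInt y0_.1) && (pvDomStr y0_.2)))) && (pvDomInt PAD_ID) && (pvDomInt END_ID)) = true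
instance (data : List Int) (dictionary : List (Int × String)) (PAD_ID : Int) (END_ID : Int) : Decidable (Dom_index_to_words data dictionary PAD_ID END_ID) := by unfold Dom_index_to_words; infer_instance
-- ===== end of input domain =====

-- B replaces A's break-and-accumulate loop with truncation at the first END_ID followed by balanced divide-and-conquer concatenation over index ranges (alternative decomposition, same values).


-- ===== PORT A =====
-- the for/break/accumulate loop of A, recursing over `data` with the accumulator `text`
def goA (dictionary : List (Int × String)) (PAD_ID : Int) (END_ID : Int) : List Int → String → String
  | [], text => text
  | w :: rest, text =>
    if w = END_ID then text
    else if w ≠ PAD_ID then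
      goA dictionary PAD_ID END_ID rest (text ++ (dictionary.lookup w).getD "")
    else goA dictionary PAD_ID END_ID rest text

def index_to_words (data : List Int) (dictionary : List (Int × String)) (PAD_ID : Int) (END_ID : Int) : String :=
  goA dictionary PAD_ID END_ID data ""

-- ===== PORT B =====
-- the leaf of B's recursion: '' if w == PAD_ID else dictionary[w]
-- (the lookup is total here; inside Pre_ the key is always present, matching Python's dictionary[w])
def pieceB (dictionary : List (Int × String)) (PAD_ID : Int) (w : Int) : String :=
  if w = PAD_ID then "" else (dictionary.lookup w).getD ""

-- B's inner merge(lo, hi): balanced divide-and-conquer over the index range [lo, hi)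
def mergeB (data : List Int) (dictionary : List (Int × String)) (PAD_ID : Int) (lo hi : Nat) : String :=
  if hi ≤ lo then ""
  else if hi - lo = 1 then pieceB dictionary PAD_ID (data.getD lo 0)  -- data[lo], in range whenever called
  else
    mergeB data dictionary PAD_ID lo ((lo + hi) / 2) ++
    mergeB data dictionary PAD_ID ((lo + hi) / 2) hi
termination_by hi - lo
decreasing_by all_goals omega

def index_to_words_alt (data : List Int) (dictionary : List (Int × String)) (PAD_ID : Int) (END_ID : Int) : String :=
  let n : Nat := if END_ID ∈ data then (PySem.List.index? data END_ID).getD 0 else data.length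
  mergeB data dictionary PAD_ID 0 n

-- ===== PRECONDITION & SPEC =====
-- Pre_ excludes exactly the inputs where Python A raises KeyError: some index before the
-- first END_ID, different from PAD_ID, is not a key of the dictionary.
def Pre_index_to_words (data : List Int) (dictionary : List (Int × String)) (PAD_ID : Int) (END_ID : Int) : Prop :=
  ((data.takeWhile (fun w => w != END_ID)).all
    (fun w => w == PAD_ID || (dictionary.lookup w).isSome)) = true
instance (data : List Int) (dictionary : List (Int × String)) (PAD_ID : Int) (END_ID : Int) : Decidable (Pre_index_to_words data dictionary PAD_ID END_ID) := by unfold Pre_index_to_words; infer_instance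

def pvWitness_index_to_words : List Int × (List (Int × String)) × Int × Int :=
  ([1, 0, 2, 3, 1], [(1, "hello"), (2, " world")], 0, 3)

def Spec_index_to_words (data : List Int) (dictionary : List (Int × String)) (PAD_ID : Int) (END_ID : Int) (out : String) : Prop := out = index_to_words_alt data dictionary PAD_ID END_ID
instance (data : List Int) (dictionary : List (Int × String)) (PAD_ID : Int) (END_ID : Int) (out : String) : Decidable (Spec_index_to_words data dictionary PAD_ID END_ID out) := by unfold Spec_index_to_words; infer_instance

-- ===== CLAIM (what is proved, stated in full; the proofs are below) =====
def Claim_equal_index_to_words : Prop := ∀ (data : List Int) (dictionary : List (Int × String)) (PAD_ID : Int) (END_ID : Int), Dom_index_to_words data dictionary PAD_ID END_ID → Pre_index_to_words data dictionary PAD_ID END_ID → Spec_index_to_words data dictionary PAD_ID END_ID (index_to_words data dictionary PAD_ID END_ID)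

-- ===== LEMMAS AND PROOFS =====

-- the concatenation of the pieces of a list of indices (proof-side characterisation)
def piecesB (dictionary : List (Int × String)) (PAD_ID : Int) (l : List Int) : String :=
  l.foldr (fun w acc => pieceB dictionary PAD_ID w ++ acc) ""

theorem piecesB_cons (dictionary : List (Int × String)) (P w : Int) (l : List Int) :
    piecesB dictionary P (w :: l) = pieceB dictionary P w ++ piecesB dictionary P l := rfl

theorem piecesB_append (dictionary : List (Int × String)) (P : Int) (a b : List Int) :
    piecesB dictionary P (a ++ b) = piecesB dictionary P a ++ piecesB dictionary P b := by
  induction a with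
  | nil => simp [piecesB]
  | cons w t ih => simp [piecesB, List.foldr_cons] at ih ⊢; rw [ih, String.append_assoc]

-- A's loop computes text ++ (pieces of the takeWhile prefix)
theorem goA_eq (dictionary : List (Int × String)) (P E : Int) (data : List Int) (text : String) :
    goA dictionary P E data text
      = text ++ piecesB dictionary P (data.takeWhile (fun w => w != E)) := by
  induction data generalizing text with
  | nil => simp [goA, piecesB]
  | cons w rest ih =>
    by_cases hwE : w = E
    · subst hwE; simp [goA, piecesB]
    · rw [List.takeWhile_cons_of_pos (by simpa using hwE)]
      by_cases hwP : w = P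
      · subst hwP
        have : goA dictionary w E (w :: rest) text = goA dictionary w E rest text := by
          simp [goA, hwE]
        rw [this, ih, piecesB]
        simp [List.foldr_cons, pieceB, piecesB]
      · have : goA dictionary P E (w :: rest) text
            = goA dictionary P E rest (text ++ (dictionary.lookup w).getD "") := by
          simp [goA, hwE, hwP]
        rw [this, ih, piecesB_cons]
        simp [pieceB, hwP, String.append_assoc]

-- B's merge over [lo, hi) is the pieces of the corresponding index slice
theorem mergeB_eq (data : List Int) (dictionary : List (Int × String)) (P : Int) :
    ∀ (k lo hi : Nat), hi - lo ≤ k → hi ≤ data.length →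
      mergeB data dictionary P lo hi
        = piecesB dictionary P ((data.drop lo).take (hi - lo)) := by
  intro k
  induction k with
  | zero =>
    intro lo hi hk _
    rw [mergeB]
    have h0 : hi - lo = 0 := by omega
    simp [h0, piecesB, Nat.le_of_sub_eq_zero h0]
  | succ k ih =>
    intro lo hi hk hlen
    rw [mergeB]
    by_cases h1 : hi ≤ lo
    · have h0 : hi - lo = 0 := by omega
      simp [h1, h0, piecesB]
    · by_cases h2 : hi - lo = 1
      · have hlt : lo < data.length := by omega
        rw [if_neg h1, if_pos h2, h2]
        rw [List.drop_eq_getElem_cons hlt, List.take_succ_cons, List.take_zero]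
        simp [piecesB, List.getElem?_eq_getElem hlt]
      · have hmid1 : (lo + hi) / 2 - lo ≤ k := by omega
        have hmid2 : hi - (lo + hi) / 2 ≤ k := by omega
        rw [if_neg h1, if_neg h2,
          ih lo ((lo + hi) / 2) hmid1 (by omega),
          ih ((lo + hi) / 2) hi hmid2 hlen, ← piecesB_append]
        congr 1
        have hsplit : hi - lo = ((lo + hi) / 2 - lo) + (hi - (lo + hi) / 2) := by omega
        rw [hsplit, List.take_add, List.drop_drop]
        congr 3
        omega

-- B's truncation length gives exactly the takeWhile prefix
theorem trunc_take (data : List Int) (E : Int) :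
    data.take (if E ∈ data then (PySem.List.index? data E).getD 0 else data.length)
      = data.takeWhile (fun w => w != E) := by
  induction data with
  | nil => simp
  | cons w rest ih =>
    by_cases hwE : w = E
    · subst hwE
      rw [if_pos List.mem_cons_self, PySem.List.index?_cons_self]
      simp
    · rw [List.takeWhile_cons_of_pos (by simpa using hwE)]
      by_cases hmem : E ∈ rest
      · obtain ⟨j, hj⟩ := Option.isSome_iff_exists.mp
          ((PySem.List.index?_isSome_iff (xs := rest) (v := E)).mpr hmem)
        rw [if_pos (List.mem_cons_of_mem _ hmem), PySem.List.index?_cons_of_ne rest hwE, hj]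
        rw [if_pos hmem, hj] at ih
        simp only [Option.map_some, Option.getD_some] at *
        rw [List.take_succ_cons, ih]
      · have hE : E ∉ w :: rest := by
          intro h; rcases List.mem_cons.mp h with h | h
          · exact hwE h.symm
          · exact hmem h
        rw [if_neg hE]
        rw [if_neg hmem] at ih
        simpa using congrArg (List.cons w) ih

-- the truncation length never exceeds the list length
theorem trunc_le (data : List Int) (E : Int) :
    (if E ∈ data then (PySem.List.index? data E).getD 0 else data.length) ≤ data.length := by
  split
  · next hmem =>
    obtain ⟨j, hj⟩ := Option.isSome_iff_exists.mp
      ((PySem.List.index?_isSome_iff (xs := data) (v := E)).mpr hmem)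
    obtain ⟨hk, -, -⟩ := PySem.List.getElem_of_index?_eq_some hj
    rw [hj]; simp; omega
  · exact le_refl _

-- ===== VERDICT (by name: the statement is the Claim_ definition above) =====
theorem index_to_words_spec : Claim_equal_index_to_words := by
  intro data dictionary PAD_ID END_ID _ _
  unfold Spec_index_to_words index_to_words index_to_words_alt
  rw [goA_eq]
  set n := if END_ID ∈ data then (PySem.List.index? data END_ID).getD 0 else data.length with hn
  rw [mergeB_eq data dictionary PAD_ID n 0 n (by omega) (trunc_le data END_ID)]
  rw [List.drop_zero, Nat.sub_zero, trunc_take]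
  simp
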